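-- pv_equiv track=rewrite | github.com/gfyoung/stemming | stemming/stemming.py | is_consonant
-- ===== SOURCE A (Python) =====
-- def is_consonant(word, i):
--     """
--     Check if the letter at index `i` of `word` is a consonant.
--
--     Per Porter (1980), a consonant is a letter not in {'a', 'e',
--     'i', 'o', 'u'} and is not a 'y' preceded by a consonant.
--
--     Letters that are not consonants are thereby vowels. Note that
--     we implement consonant checking because there are more cases
--     where we want consonants than vowels in other stemming checks.
--
--     Parameters
--     ----------
--     word : str
--         The word whose letter we are checking. Assumed lowercase.
--     i : int
--         The index corresponding to the letter we are checking.
--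
--     Returns
--     -------
--     is_consonant : bool
--         Whether or not the letter at the index in the word is a consonant.
--     """
--
--     vowels = {"a", "e", "i", "o", "u"}
--
--     if word[i] in vowels:
--         return False
--
--     if word[i] == "y":
--         if i == 0:
--             return True
--         else:
--             return not (is_consonant(word, i - 1))
--
--     return True
-- ===== SOURCE B (Python) =====
-- def is_consonant(word, i):
--     vowels = {"a", "e", "i", "o", "u"}
--
--     c = word[i]
--     if c in vowels:
--         return False
--     if c != "y":
--         return True
--
--     # 'y' case: walk the run of 'y's backward from i and apply its parity,
--     # instead of recursing one index at a time.
--     j, m = i, 0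
--     while word[j] == "y":
--         m += 1
--         if j == 0:
--             # the run reaches the start: a leading 'y' is a consonant
--             return m % 2 == 1
--         j -= 1
--
--     base = word[j] not in vowels
--     return base if m % 2 == 0 else not base
-- ===== Notes on version B (the rewrite author's own statement) =====
-- stated objective: alternative
-- what changed: Replaces A's recursion for the 'y' case by an iterative backward scan that counts the 'y'-run length and applies its parity to the base classification of the first non-'y' letter (or to True when the run reaches index 0).
import Mathlib
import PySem

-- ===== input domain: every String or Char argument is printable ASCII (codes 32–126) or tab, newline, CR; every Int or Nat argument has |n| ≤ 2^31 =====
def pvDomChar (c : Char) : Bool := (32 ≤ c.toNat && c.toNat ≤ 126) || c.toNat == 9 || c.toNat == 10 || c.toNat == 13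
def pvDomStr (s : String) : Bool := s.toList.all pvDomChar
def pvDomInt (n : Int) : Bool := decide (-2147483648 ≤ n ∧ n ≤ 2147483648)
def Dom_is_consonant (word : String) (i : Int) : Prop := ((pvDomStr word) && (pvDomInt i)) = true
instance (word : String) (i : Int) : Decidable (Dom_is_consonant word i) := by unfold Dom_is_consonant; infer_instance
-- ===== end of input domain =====

-- B replaces A's recursion for the 'y' case by an iterative backward scan over the 'y'-run,
-- applying the run length's parity to the base classification (objective: alternative).

-- ===== PORT A =====
def pvVowel (c : Char) : Bool := ['a', 'e', 'i', 'o', 'u'].contains c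

def is_consonant (word : String) (i : Int) : Bool :=
  match h : PySem.List.pyGet? word.toList i with
  | none => false   -- Python raises IndexError here; outside Pre_
  | some c =>
    if pvVowel c then false
    else if c = 'y' then
      if i = 0 then true
      else !(is_consonant word (i - 1))
    else true
termination_by (i + word.toList.length + 1).toNat
decreasing_by
  have hr : PySem.Raise.InRange word.toList.length i := by
    by_contra hc
    rw [← PySem.List.pyGet?_eq_none_iff] at hc
    simp [hc] at h
  rcases hr with ⟨h1, h2⟩
  omega

-- ===== PORT B =====
def yScan (word : String) (j : Int) (m : Nat) : Bool :=
  match h : PySem.List.pyGet? word.toList j with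
  | none => false   -- Python raises IndexError here; outside Pre_
  | some c =>
    if c = 'y' then
      if j = 0 then decide ((m + 1) % 2 = 1)
      else yScan word (j - 1) (m + 1)
    else
      if m % 2 = 0 then !(pvVowel c) else !(!(pvVowel c))
termination_by (j + word.toList.length + 1).toNat
decreasing_by
  have hr : PySem.Raise.InRange word.toList.length j := by
    by_contra hc
    rw [← PySem.List.pyGet?_eq_none_iff] at hc
    simp [hc] at h
  rcases hr with ⟨h1, h2⟩
  omega

def is_consonant_alt (word : String) (i : Int) : Bool :=
  match PySem.List.pyGet? word.toList i with
  | none => false   -- Python raises IndexError here; outside Pre_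
  | some c =>
    if pvVowel c then false
    else if c ≠ 'y' then true
    else yScan word i 0

-- ===== PRECONDITION & SPEC =====
-- Pre_ excludes exactly the inputs on which A raises IndexError: an index i outside
-- [-len, len), and a negative i whose whole prefix (Python positions i down to -len)
-- consists of 'y', on which A's recursion runs off the front of the word.
def Pre_is_consonant (word : String) (i : Int) : Prop :=
  PySem.Raise.InRange word.toList.length i ∧
    (0 ≤ i ∨ ¬ ((word.toList.take (i + word.toList.length + 1).toNat).all (· == 'y')))
instance (word : String) (i : Int) : Decidable (Pre_is_consonant word i) := by
  unfold Pre_is_consonant; infer_instance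

def pvWitness_is_consonant : String × Int := ("by", 1)

def Spec_is_consonant (word : String) (i : Int) (out : Bool) : Prop := out = is_consonant_alt word i
instance (word : String) (i : Int) (out : Bool) : Decidable (Spec_is_consonant word i out) := by
  unfold Spec_is_consonant; infer_instance

-- ===== CLAIM (what is proved, stated in full; the proofs are below) =====
def Claim_equal_is_consonant : Prop := ∀ (word : String) (i : Int), Dom_is_consonant word i → Pre_is_consonant word i → Spec_is_consonant word i (is_consonant word i)

-- ===== LEMMAS AND PROOFS =====

theorem pvInRange_of_some {α : Type} {xs : List α} {i : Int} {c : α}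
    (h : PySem.List.pyGet? xs i = some c) : PySem.Raise.InRange xs.length i := by
  by_contra hc
  rw [← PySem.List.pyGet?_eq_none_iff] at hc
  simp [hc] at h

theorem yScan_some {word : String} {j : Int} {c : Char} (m : Nat)
    (hg : PySem.List.pyGet? word.toList j = some c) :
    yScan word j m =
      (if c = 'y' then
        (if j = 0 then decide ((m + 1) % 2 = 1) else yScan word (j - 1) (m + 1))
      else if m % 2 = 0 then !(pvVowel c) else !(!(pvVowel c))) := by
  rw [yScan.eq_def]
  split
  · next heq => rw [heq] at hg; exact absurd hg (by simp)
  · next c' heq =>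
      rw [heq] at hg
      injection hg with h
      subst h
      rfl

theorem is_consonant_some {word : String} {i : Int} {c : Char}
    (hg : PySem.List.pyGet? word.toList i = some c) :
    is_consonant word i =
      (if pvVowel c then false
       else if c = 'y' then (if i = 0 then true else !(is_consonant word (i - 1)))
       else true) := by
  rw [is_consonant.eq_def]
  split
  · next heq => rw [heq] at hg; exact absurd hg (by simp)
  · next c' heq =>
      rw [heq] at hg
      injection hg with h
      subst h
      rfl

theorem yScan_eq (word : String) :
    ∀ (k : Nat) (j : Int) (m : Nat), (j + word.toList.length + 1).toNat ≤ k →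
    (PySem.List.pyGet? word.toList j).isSome →
    (0 ≤ j ∨ ¬ ((word.toList.take (j + word.toList.length + 1).toNat).all (· == 'y'))) →
    yScan word j m = (if m % 2 = 0 then is_consonant word j else !(is_consonant word j)) := by
  intro k
  induction k with
  | zero =>
    intro j m hk hs hc
    obtain ⟨c, hg⟩ := Option.isSome_iff_exists.mp hs
    obtain ⟨h1, h2⟩ := pvInRange_of_some hg
    omega
  | succ k ih =>
    intro j m hk hs hc
    obtain ⟨c, hg⟩ := Option.isSome_iff_exists.mp hs
    obtain ⟨h1, h2⟩ := pvInRange_of_some hg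
    rw [yScan_some m hg, is_consonant_some hg]
    by_cases hv : pvVowel c
    · -- vowel: not 'y'
      have hcy : c ≠ 'y' := by
        intro he; subst he; simp [pvVowel] at hv
      simp only [hv, if_true, hcy, if_false]
      by_cases hm : m % 2 = 0 <;> simp [hm]
    · by_cases hy : c = 'y'
      · subst hy
        simp only [hv, if_false, if_true]
        by_cases h0 : j = 0
        · subst h0
          simp only [if_true]
          by_cases hm : m % 2 = 0
          · have : (m + 1) % 2 = 1 := by omega
            simp [hm, this]
          · have : (m + 1) % 2 ≠ 1 := by omega
            simp [hm, this]
        · simp only [h0, if_false]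
          -- establish IH prerequisites at j - 1
          have hstep : PySem.Raise.InRange word.toList.length (j - 1) ∧
              (0 ≤ j - 1 ∨ ¬ ((word.toList.take ((j - 1) + word.toList.length + 1).toNat).all (· == 'y'))) := by
            by_cases hjpos : 0 < j
            · exact ⟨⟨by omega, by omega⟩, Or.inl (by omega)⟩
            · have hjneg : j < 0 := by omega
              have hcne : ¬ ((word.toList.take (j + word.toList.length + 1).toNat).all (· == 'y')) := by
                rcases hc with hc | hc
                · omega
                · exact hc
              -- position of c in the list
              have hpos : word.toList[((j + word.toList.length).toNat)]? = some 'y' := by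
                have := PySem.List.pyGet?_neg word.toList hjneg h1
                rw [hg] at this
                have he : word.toList.length - (-j).toNat = (j + word.toList.length).toNat := by omega
                rw [he] at this
                exact this.symm
              have htake : word.toList.take ((j + word.toList.length).toNat + 1) =
                  word.toList.take ((j + word.toList.length).toNat) ++ ['y'] := by
                rw [List.take_add_one, hpos]
                rfl
              have he1 : (j + word.toList.length + 1).toNat = (j + word.toList.length).toNat + 1 := by omega
              rw [he1, htake] at hcne
              simp only [List.all_append, List.all_cons, List.all_nil] at hcne
              have hcne' : ¬ ((word.toList.take ((j + word.toList.length).toNat)).all (· == 'y')) := by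
                simpa using hcne
              have hp1 : 1 ≤ (j + word.toList.length).toNat := by
                by_contra hp0
                have : (j + word.toList.length).toNat = 0 := by omega
                rw [this] at hcne'
                simp at hcne'
              have he2 : ((j - 1) + word.toList.length + 1).toNat = (j + word.toList.length).toNat := by omega
              refine ⟨⟨by omega, by omega⟩, Or.inr ?_⟩
              rw [he2]
              exact hcne'
          obtain ⟨⟨hs1, hs2⟩, hcond⟩ := hstep
          have hsome : (PySem.List.pyGet? word.toList (j - 1)).isSome := by
            rw [Option.isSome_iff_ne_none]
            intro hn
            rw [PySem.List.pyGet?_eq_none_iff] at hn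
            exact hn ⟨hs1, hs2⟩
          have hihm : ((j - 1) + word.toList.length + 1).toNat ≤ k := by omega
          rw [ih (j - 1) (m + 1) hihm hsome hcond]
          by_cases hm : m % 2 = 0
          · have : (m + 1) % 2 ≠ 0 := by omega
            simp [hm, this]
          · have : (m + 1) % 2 = 0 := by omega
            simp [hm, this]
      · simp only [hv, if_false, hy]
        by_cases hm : m % 2 = 0 <;> simp [hm, hy]

theorem is_consonant_spec : Claim_equal_is_consonant := by
  intro word i _ hpre
  obtain ⟨⟨h1, h2⟩, hc⟩ := hpre
  unfold Spec_is_consonant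
  have hsome : (PySem.List.pyGet? word.toList i).isSome := by
    rw [Option.isSome_iff_ne_none]
    intro hn
    rw [PySem.List.pyGet?_eq_none_iff] at hn
    exact hn ⟨h1, h2⟩
  obtain ⟨c, hg⟩ := Option.isSome_iff_exists.mp hsome
  unfold is_consonant_alt
  rw [hg]
  by_cases hv : pvVowel c
  · simp only [hv, if_true]
    rw [is_consonant_some hg]
    simp [hv]
  · by_cases hy : c = 'y'
    · subst hy
      simp only [hv, if_false]
      simp only [ne_eq, not_true_eq_false, if_false]
      rw [yScan_eq word ((i + word.toList.length + 1).toNat) i 0 (le_refl _) hsome hc]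
      simp
    · simp only [hv, if_false, ne_eq, hy, not_false_eq_true, if_true]
      rw [is_consonant_some hg]
      simp [hv, hy]
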